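-- pv_equiv track=rewrite | github.com/decisionenabler-sk/python-de-practice | two_pointer_zig_zag.py | ditribute_tasks
-- ===== SOURCE A (Python) =====
-- def ditribute_tasks(task_times: list[int]) -> list[int]:
--     if not task_times:
--         return task_times
--     sorted_tasks = sorted(task_times)
--     short = 0
--     long = len(sorted_tasks) - 1
--     result = []
--     while short <= long:
--         result.append(sorted_tasks[short])
--         short += 1
--         if short <= long:
--             result.append(sorted_tasks[long])
--             long -= 1
--     return result
-- ===== SOURCE B (Python) =====
-- def ditribute_tasks(task_times: list[int]) -> list[int]:
--     if not task_times:
--         return task_times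
--     s = sorted(task_times)
--     mid = (len(s) + 1) // 2
--     lows = s[:mid]
--     highs = s[mid:][::-1]
--     result = [v for pair in zip(lows, highs) for v in pair]
--     if len(s) % 2 == 1:
--         result.append(lows[-1])
--     return result
-- ===== Notes on version B (the rewrite author's own statement) =====
-- stated objective: alternative
-- what changed: Replaces the two-pointer while loop with index bookkeeping by splitting the sorted list into a low half and a reversed high half and zipping them together, appending the middle element for odd lengths.
import Mathlib
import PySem

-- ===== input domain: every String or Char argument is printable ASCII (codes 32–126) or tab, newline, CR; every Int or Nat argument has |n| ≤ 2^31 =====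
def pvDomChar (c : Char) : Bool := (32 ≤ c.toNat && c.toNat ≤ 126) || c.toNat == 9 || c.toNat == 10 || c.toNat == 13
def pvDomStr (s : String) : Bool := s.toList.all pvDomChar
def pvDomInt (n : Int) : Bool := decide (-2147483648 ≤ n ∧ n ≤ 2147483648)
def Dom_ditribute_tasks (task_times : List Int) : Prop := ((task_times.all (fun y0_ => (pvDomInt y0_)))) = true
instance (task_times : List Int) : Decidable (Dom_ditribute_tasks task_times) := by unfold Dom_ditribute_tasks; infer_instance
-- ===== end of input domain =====

-- B replaces A's two-pointer while loop by zipping the low half of the sorted list with the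
-- reversed high half (alternative decomposition, same cost).

-- ===== PORT A =====
-- the while loop of A; `short`/`long` index into `st`; every index used is in range
-- when called as below (0 ≤ short ≤ long < st.length), so pyGetD's default is never taken
-- fuel = number of remaining iterations (an upper bound); makes the loop structural
def ditribute_tasks_loop (st : List Int) : Nat → Int → Int → List Int → List Int
  | 0, _, _, result => result
  | fuel + 1, short, long, result =>
    if short ≤ long then
      if short + 1 ≤ long then
        ditribute_tasks_loop st fuel (short + 1) (long - 1)
          (result ++ [PySem.List.pyGetD st short 0, PySem.List.pyGetD st long 0])
      else
        ditribute_tasks_loop st fuel (short + 1) long (result ++ [PySem.List.pyGetD st short 0])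
    else
      result

def ditribute_tasks (task_times : List Int) : List Int :=
  if task_times = [] then task_times
  else
    let sorted_tasks := PySem.List.sorted task_times (fun x => x) false
    ditribute_tasks_loop sorted_tasks sorted_tasks.length 0 ((sorted_tasks.length : Int) - 1) []

-- ===== PORT B =====
def ditribute_tasks_alt (task_times : List Int) : List Int :=
  if task_times = [] then task_times
  else
    let s := PySem.List.sorted task_times (fun x => x) false
    let mid : Int := PySem.Int.floordiv ((s.length : Int) + 1) 2
    let lows := PySem.List.slice s none (some mid)
    let highs := (PySem.List.slice s (some mid) none).reverse  -- s[mid:][::-1]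
    let result := (lows.zip highs).flatMap (fun p => [p.1, p.2])
    if s.length % 2 = 1 then result ++ [PySem.List.pyGetD lows (-1) 0] else result

-- ===== PRECONDITION & SPEC =====
def Spec_ditribute_tasks (task_times : List Int) (out : List Int) : Prop := out = ditribute_tasks_alt task_times
instance (task_times : List Int) (out : List Int) : Decidable (Spec_ditribute_tasks task_times out) := by unfold Spec_ditribute_tasks; infer_instance

-- ===== CLAIM (what is proved, stated in full; the proofs are below) =====
def Claim_equal_ditribute_tasks : Prop := ∀ (task_times : List Int), Dom_ditribute_tasks task_times → Spec_ditribute_tasks task_times (ditribute_tasks task_times)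

-- ===== LEMMAS AND PROOFS =====

-- two-ended zigzag recursion: head, last, then the interior
def zig : List Int → List Int
  | [] => []
  | x :: xs =>
    if h : xs = [] then [x]
    else x :: xs.getLast h :: zig xs.dropLast
termination_by l => l.length
decreasing_by simp

-- B's core computation on an arbitrary list (Nat arithmetic form)
def bcomb (l : List Int) : List Int :=
  let mid := (l.length + 1) / 2
  let res := ((l.take mid).zip ((l.drop mid).reverse)).flatMap (fun p => [p.1, p.2])
  if l.length % 2 = 1 then res ++ [PySem.List.pyGetD (l.take mid) (-1) 0] else res

lemma zig_nil : zig [] = [] := by rw [zig]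

lemma zig_single (x : Int) : zig [x] = [x] := by rw [zig]; simp

lemma zig_cons_append (x y : Int) (m : List Int) :
    zig (x :: (m ++ [y])) = x :: y :: zig m := by
  rw [zig]
  have h : (m ++ [y] : List Int) ≠ [] := by simp
  simp [h]

lemma bcomb_nil : bcomb [] = [] := by simp [bcomb]

lemma bcomb_single (x : Int) : bcomb [x] = [x] := by
  simp [bcomb, PySem.List.pyGetD_neg_one]

lemma bcomb_cons_append (x z : Int) (m : List Int) :
    bcomb (x :: (m ++ [z])) = x :: z :: bcomb m := by
  have hlen : (x :: (m ++ [z])).length = m.length + 2 := by simp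
  have hle : (m.length + 1) / 2 ≤ m.length := by omega
  have hmid : (m.length + 2 + 1) / 2 = (m.length + 1) / 2 + 1 := by omega
  unfold bcomb
  simp only [hlen, hmid]
  have htake : (x :: (m ++ [z])).take ((m.length + 1) / 2 + 1)
      = x :: m.take ((m.length + 1) / 2) := by
    rw [List.take_succ_cons, List.take_append_of_le_length hle]
  have hdrop : (x :: (m ++ [z])).drop ((m.length + 1) / 2 + 1)
      = m.drop ((m.length + 1) / 2) ++ [z] := by
    rw [List.drop_succ_cons, List.drop_append_of_le_length hle]
  rw [htake, hdrop]
  simp only [List.reverse_append, List.reverse_singleton, List.singleton_append,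
    List.zip_cons_cons, List.flatMap_cons]
  have hpar : (m.length + 2) % 2 = m.length % 2 := by omega
  rw [hpar]
  by_cases hodd : m.length % 2 = 1
  · have hml1 : 1 ≤ m.length := by omega
    have hne : m.take ((m.length + 1) / 2) ≠ [] := by
      simp only [ne_eq, List.take_eq_nil_iff, not_or]
      exact ⟨by omega, fun h => by simp [h] at hml1⟩
    rw [if_pos hodd, if_pos hodd]
    rw [PySem.List.pyGetD_neg_one (m.take ((m.length + 1) / 2)) 0 hne,
        PySem.List.pyGetD_neg_one (x :: m.take ((m.length + 1) / 2)) 0 (by simp),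
        List.getLast_cons hne]
    simp
  · rw [if_neg hodd, if_neg hodd]
    simp

lemma zig_eq_bcomb (l : List Int) : zig l = bcomb l := by
  induction hn : l.length using Nat.strong_induction_on generalizing l with
  | _ n ih =>
    match l, hn with
    | [], hn => rw [zig_nil, bcomb_nil]
    | [x], hn => rw [zig_single, bcomb_single]
    | x :: y :: ys, hn =>
      have hn' : ys.length + 2 = n := by simpa using hn
      have hne : (y :: ys : List Int) ≠ [] := by simp
      have hmz : (y :: ys : List Int) = (y :: ys).dropLast ++ [(y :: ys).getLast hne] :=
        (List.dropLast_append_getLast hne).symm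
      set m := (y :: ys).dropLast with hm
      set z := (y :: ys).getLast hne with hz
      have hml : m.length < n := by
        have hl2 := congrArg List.length hmz
        simp at hl2
        omega
      rw [hmz, zig_cons_append, bcomb_cons_append, ih m.length (by omega) m rfl]

-- seg [a..b] of st decomposed as head :: interior ++ [last]  (Nat indices)
lemma seg_decomp (st : List Int) (a b : Nat) (hab : a < b) (hb : b < st.length) :
    (st.drop a).take (b + 1 - a)
      = st[a] :: ((st.drop (a + 1)).take (b - 1 - a) ++ [st[b]]) := by
  have ha : a < st.length := by omega
  have h1 : st.drop a = st[a] :: st.drop (a + 1) := (List.getElem_cons_drop ha).symm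
  rw [h1]
  have h2 : b + 1 - a = (b - 1 - a) + 1 + 1 := by omega
  rw [h2, List.take_succ_cons, List.take_add_one]
  congr 1
  have h3 : (st.drop (a + 1))[b - 1 - a]? = some st[b] := by
    rw [List.getElem?_drop]
    have : a + 1 + (b - 1 - a) = b := by omega
    rw [this, List.getElem?_eq_getElem hb]
  rw [h3]
  rfl

lemma loop_eq_zig (st : List Int) : ∀ (k : Nat) (s t : Int) (acc : List Int),
    (t + 1 - s).toNat ≤ k → 0 ≤ s → t < (st.length : Int) →
    ditribute_tasks_loop st k s t acc = acc ++ zig ((st.drop s.toNat).take (t + 1 - s).toNat) := by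
  intro k
  induction k with
  | zero =>
    intro s t acc hk _ _
    have h8 : (t + 1 - s).toNat = 0 := by omega
    rw [h8]
    simp [ditribute_tasks_loop, zig_nil]
  | succ k ih =>
    intro s t acc hk hs ht
    rw [ditribute_tasks_loop]
    by_cases h1 : s ≤ t
    · have hsn : s.toNat < st.length := by omega
      have hgs : PySem.List.pyGetD st s 0 = st[s.toNat] :=
        PySem.List.pyGetD_eq_getElem st 0 hs (by omega)
      by_cases h2 : s + 1 ≤ t
      · have htn : t.toNat < st.length := by omega
        have hgt : PySem.List.pyGetD st t 0 = st[t.toNat] :=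
          PySem.List.pyGetD_eq_getElem st 0 (by omega) (by omega)
        rw [if_pos h1, if_pos h2]
        rw [ih (s + 1) (t - 1) _ (by omega) (by omega) (by omega)]
        have hd : (st.drop s.toNat).take (t + 1 - s).toNat
            = st[s.toNat] :: ((st.drop (s.toNat + 1)).take (t.toNat - 1 - s.toNat) ++ [st[t.toNat]]) := by
          have := seg_decomp st s.toNat t.toNat (by omega) (by omega)
          rw [← this]
          congr 1
          omega
        rw [hd, zig_cons_append]
        have h5 : (s + 1).toNat = s.toNat + 1 := by omega
        have h6 : (t - 1 + 1 - (s + 1)).toNat = t.toNat - 1 - s.toNat := by omega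
        rw [h5, h6, hgs, hgt]
        simp
      · -- s = t: single element; the recursive call has short > long and returns its acc
        have hst : s = t := by omega
        rw [if_pos h1, if_neg h2]
        rw [ih (s + 1) t _ (by omega) (by omega) ht]
        have h0 : (t + 1 - (s + 1)).toNat = 0 := by omega
        rw [h0]
        have hseg : (st.drop s.toNat).take (t + 1 - s).toNat = [st[s.toNat]] := by
          have h7 : (t + 1 - s).toNat = 1 := by omega
          rw [h7]
          rw [List.take_one]
          rw [List.head?_drop]
          rw [List.getElem?_eq_getElem hsn]
          rfl
        rw [hseg, zig_single, hgs]
        simp [zig_nil]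
    · rw [if_neg h1]
      have h8 : (t + 1 - s).toNat = 0 := by omega
      rw [h8]
      simp [zig_nil]

lemma alt_eq_bcomb (l : List Int) (hne : l ≠ []) :
    ditribute_tasks_alt l = bcomb (PySem.List.sorted l (fun x => x) false) := by
  unfold ditribute_tasks_alt
  rw [if_neg hne]
  set s := PySem.List.sorted l (fun x => x) false with hs
  have hmid : PySem.Int.floordiv ((s.length : Int) + 1) 2 = (((s.length + 1) / 2 : Nat) : Int) := by
    have : ((s.length : Int) + 1) = (((s.length + 1 : Nat)) : Int) := by push_cast; ring
    rw [this]
    exact_mod_cast PySem.Int.floordiv_natCast (s.length + 1) 2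
  simp only [hmid, PySem.List.slice_to_natCast, PySem.List.slice_from_natCast, bcomb]

-- ===== VERDICT (by name: the statement is the Claim_ definition above) =====
theorem ditribute_tasks_spec : Claim_equal_ditribute_tasks := by
  intro l _
  unfold Spec_ditribute_tasks
  by_cases hne : l = []
  · subst hne; rfl
  · rw [alt_eq_bcomb l hne]
    unfold ditribute_tasks
    rw [if_neg hne]
    set s := PySem.List.sorted l (fun x => x) false with hs
    have hsl : s ≠ [] := by
      intro h
      apply hne
      have := PySem.List.sorted_perm l (fun x => x) false
      rw [hs] at h
      rw [h] at this
      exact this.symm.eq_nil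
    have hlen : 0 < s.length := List.length_pos_iff.mpr hsl
    rw [loop_eq_zig s s.length 0 ((s.length : Int) - 1) [] (by omega) (by omega) (by omega)]
    have h9 : (((s.length : Int) - 1) + 1 - 0).toNat = s.length := by omega
    rw [h9]
    simp [zig_eq_bcomb]
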